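-- pv_equiv track=rewrite | github.com/pyg-team/pytorch_geometric | torch_geometric/nn/conv/utils/typing.py | resolve_types
-- ===== SOURCE A (Python) =====
-- from itertools import product
-- from typing import Callable, Dict, List, Tuple
--
-- def split_types_repr(types_repr: str) -> List[str]:
--     out = []
--     i = depth = 0
--     for j, char in enumerate(types_repr):
--         if char == '[':
--             depth += 1
--         elif char == ']':
--             depth -= 1
--         elif char == ',' and depth == 0:
--             out.append(types_repr[i:j].strip())
--             i = j + 1
--     out.append(types_repr[i:].strip())
--     return out
--
-- def resolve_types(arg_types: Dict[str, str],
--                   return_type_repr: str) -> List[Tuple[List[str], str]]: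
--     out = []
--     for type_repr in arg_types.values():
--         if type_repr[:5] == 'Union':
--             out.append(split_types_repr(type_repr[6:-1]))
--         else:
--             out.append([type_repr])
--     return [(x, return_type_repr) for x in product(*out)]
-- ===== SOURCE B (Python) =====
-- from typing import Dict, List, Tuple
--
-- def split_types_repr(types_repr: str) -> List[str]:
--     out = []
--     i = depth = 0
--     for j, char in enumerate(types_repr):
--         if char == '[':
--             depth += 1
--         elif char == ']':
--             depth -= 1
--         elif char == ',' and depth == 0:
--             out.append(types_repr[i:j].strip())
--             i = j + 1
--     out.append(types_repr[i:].strip())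
--     return out
--
-- def resolve_types(arg_types: Dict[str, str],
--                   return_type_repr: str) -> List[Tuple[List[str], str]]:
--     # Rank-decoding enumeration: each combination is computed independently
--     # from its rank via mixed-radix (odometer) digit extraction, instead of
--     # building the cartesian product incrementally.
--     opts = []
--     for type_repr in arg_types.values():
--         if type_repr.startswith('Union'):
--             opts.append(split_types_repr(type_repr[6:-1]))
--         else:
--             opts.append([type_repr])
--     total = 1
--     for o in opts:
--         total *= len(o)
--     result = []
--     for rank in range(total):
--         combo, rem = [], rank
--         for o in reversed(opts):
--             combo.append(o[rem % len(o)])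
--             rem //= len(o)
--         combo.reverse()
--         result.append((tuple(combo), return_type_repr))
--     return result
-- ===== Notes on version B (the rewrite author's own statement) =====
-- stated objective: alternative
-- what changed: Replaces the build-option-lists-then-itertools.product pipeline with rank decoding: B computes the total number of combinations and reconstructs each combination independently from its rank by mixed-radix (odometer) digit extraction, instead of growing the cartesian product incrementally.
import Mathlib
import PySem

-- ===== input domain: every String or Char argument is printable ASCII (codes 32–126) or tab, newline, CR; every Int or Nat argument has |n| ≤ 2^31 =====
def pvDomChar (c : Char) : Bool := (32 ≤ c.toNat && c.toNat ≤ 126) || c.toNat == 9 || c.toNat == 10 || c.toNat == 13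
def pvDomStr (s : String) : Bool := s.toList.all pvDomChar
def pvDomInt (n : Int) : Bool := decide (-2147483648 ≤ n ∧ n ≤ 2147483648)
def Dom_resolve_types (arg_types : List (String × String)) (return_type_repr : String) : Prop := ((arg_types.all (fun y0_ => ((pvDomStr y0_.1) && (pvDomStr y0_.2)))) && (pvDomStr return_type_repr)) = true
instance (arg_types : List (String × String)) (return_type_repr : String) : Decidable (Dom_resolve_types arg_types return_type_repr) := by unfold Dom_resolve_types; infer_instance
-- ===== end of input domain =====

-- B replaces build-option-lists-then-itertools.product by rank decoding: each output combination is
-- computed independently from its rank by mixed-radix digit extraction; same order, same cost.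


-- ===== PORT A =====
-- shared helper: literal port of split_types_repr (state = (out, i, depth), loop over enumerate)
def split_types_repr (cs : List Char) : List String :=
  let st := (PySem.List.enumerate cs).foldl
    (fun (st : List String × Int × Int) (jc : Int × Char) =>
      if jc.2 = '[' then (st.1, st.2.1, st.2.2 + 1)
      else if jc.2 = ']' then (st.1, st.2.1, st.2.2 - 1)
      else if jc.2 = ',' ∧ st.2.2 = 0 then
        (st.1 ++ [String.ofList (PySem.Chars.strip (PySem.List.slice cs (some st.2.1) (some jc.1)))],
         jc.1 + 1, st.2.2)
      else st)
    ([], (0 : Int), (0 : Int))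
  st.1 ++ [String.ofList (PySem.Chars.strip (PySem.List.slice cs (some st.2.1) none))]

def resolve_types (arg_types : List (String × String)) (return_type_repr : String) : List (List String × String) :=
  let out : List (List String) := arg_types.foldl
    (fun acc kv =>
      if PySem.List.slice kv.2.toList none (some 5) = "Union".toList then
        acc ++ [split_types_repr (PySem.List.slice kv.2.toList (some 6) (some (-1)))]
      else acc ++ [[kv.2]]) []
  -- itertools.product(*out), odometer order
  (out.foldl (fun combos opts => combos.flatMap (fun prev => opts.map (fun o => prev ++ [o]))) [[]]).map
    (fun x => (x, return_type_repr))

-- ===== PORT B =====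
-- per-argument option list (body of B's first loop)
def pvOptions (tr : String) : List String :=
  if PySem.Chars.startswith tr.toList "Union".toList then
    split_types_repr (PySem.List.slice tr.toList (some 6) (some (-1)))
  else [tr]

-- B's inner loop 'for o in reversed(opts): combo.append(o[rem % len(o)]); rem //= len(o)' then
-- combo.reverse().  Python's o[rem % len(o)] is pyGet?; option lists are nonempty here so the index
-- is always in range and .getD "" is exact.
def pvDecode (opts : List (List String)) (rank : Int) : List String :=
  (opts.reverse.foldl
    (fun (st : List String × Int) o =>
      (st.1 ++ [(PySem.List.pyGet? o (PySem.Int.mod st.2 (o.length : Int))).getD ""],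
       PySem.Int.floordiv st.2 (o.length : Int)))
    ([], rank)).1.reverse

def resolve_types_alt (arg_types : List (String × String)) (return_type_repr : String) : List (List String × String) :=
  let opts : List (List String) := arg_types.foldl (fun acc kv => acc ++ [pvOptions kv.2]) []
  let total : Int := opts.foldl (fun t o => t * (o.length : Int)) 1
  (PySem.List.pyRange 0 total 1).foldl
    (fun res rank => res ++ [(pvDecode opts rank, return_type_repr)]) []

-- ===== PRECONDITION & SPEC =====
def Spec_resolve_types (arg_types : List (String × String)) (return_type_repr : String) (out : List (List String × String)) : Prop := out = resolve_types_alt arg_types return_type_repr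
instance (arg_types : List (String × String)) (return_type_repr : String) (out : List (List String × String)) : Decidable (Spec_resolve_types arg_types return_type_repr out) := by unfold Spec_resolve_types; infer_instance

-- ===== CLAIM (what is proved, stated in full; the proofs are below) =====
def Claim_equal_resolve_types : Prop := ∀ (arg_types : List (String × String)) (return_type_repr : String), Dom_resolve_types arg_types return_type_repr → Spec_resolve_types arg_types return_type_repr (resolve_types arg_types return_type_repr)

-- ===== LEMMAS AND PROOFS =====
-- proof-side abstractions
def pvTotalNat (opts : List (List String)) : Nat :=
  opts.foldr (fun o t => o.length * t) 1

def pvDecodeNat : List (List String) → Nat → List String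
  | [], _ => []
  | o :: rest, k => o.getD ((k / pvTotalNat rest) % o.length) "" :: pvDecodeNat rest k

def pvProdList (opts : List (List String)) : List (List String) :=
  opts.foldr (fun o acc => o.flatMap (fun x => acc.map (x :: ·))) [[]]

-- A's branch test tr[:5] == 'Union' agrees with B's tr.startswith('Union')
theorem slice_five_eq_startswith (tr : String) :
    (PySem.List.slice tr.toList none (some 5) = "Union".toList) ↔
    PySem.Chars.startswith tr.toList "Union".toList = true := by
  have hs : PySem.List.slice tr.toList none (some 5) = tr.toList.take 5 := by
    simpa using PySem.List.slice_to (xs := tr.toList) (b := 5) (by norm_num)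
  rw [PySem.Chars.startswith_iff, hs]
  constructor
  · intro h
    exact h ▸ List.take_prefix _ _
  · intro h
    have := List.prefix_iff_eq_take.mp h
    simpa using this.symm

-- A's per-argument option list equals B's pvOptions
theorem optA_eq_pvOptions (tr : String) :
    (if PySem.List.slice tr.toList none (some 5) = "Union".toList then
        split_types_repr (PySem.List.slice tr.toList (some 6) (some (-1)))
      else [tr]) = pvOptions tr := by
  unfold pvOptions
  by_cases h : PySem.Chars.startswith tr.toList "Union".toList = true
  · rw [if_pos ((slice_five_eq_startswith tr).mpr h), if_pos h]
  · rw [if_neg (fun hs => h ((slice_five_eq_startswith tr).mp hs)), if_neg h]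

-- A's `out`-building loop produces the map of pvOptions over the values
theorem outA_eq_map (l : List (String × String)) (acc : List (List String)) :
    l.foldl (fun acc kv =>
      if PySem.List.slice kv.2.toList none (some 5) = "Union".toList then
        acc ++ [split_types_repr (PySem.List.slice kv.2.toList (some 6) (some (-1)))]
      else acc ++ [[kv.2]]) acc
    = acc ++ l.map (fun kv => pvOptions kv.2) := by
  induction l generalizing acc with
  | nil => simp
  | cons kv rest ih =>
    simp only [List.foldl_cons, List.map_cons]
    rw [show (if PySem.List.slice kv.2.toList none (some 5) = "Union".toList then
        acc ++ [split_types_repr (PySem.List.slice kv.2.toList (some 6) (some (-1)))]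
      else acc ++ [[kv.2]]) = acc ++ [pvOptions kv.2] by
        rw [← optA_eq_pvOptions kv.2]; split_ifs <;> rfl]
    rw [ih]
    simp

-- A's product fold is pvProdList, up to a prefix
theorem prod_fold_eq_prodList (l : List (List String)) (acc : List (List String)) :
    l.foldl (fun combos opts => combos.flatMap (fun prev => opts.map (fun o => prev ++ [o]))) acc
    = acc.flatMap (fun p => (pvProdList l).map (fun t => p ++ t)) := by
  induction l generalizing acc with
  | nil => simp [pvProdList]
  | cons o rest ih =>
    simp only [List.foldl_cons]
    rw [ih]
    simp only [pvProdList, List.foldr_cons, List.flatMap_assoc]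
    congr 1
    funext prev
    rw [List.flatMap_map, List.map_flatMap]
    congr 1
    funext x
    rw [List.map_map]
    congr 1
    funext t
    simp

-- B's total-computing loop is pvTotalNat
theorem total_fold_eq (opts : List (List String)) (c : Int) :
    opts.foldl (fun t o => t * (o.length : Int)) c = c * (pvTotalNat opts : Nat) := by
  induction opts generalizing c with
  | nil => simp [pvTotalNat]
  | cons o rest ih =>
    simp only [List.foldl_cons, pvTotalNat, List.foldr_cons] at *
    rw [ih]
    push_cast
    ring

-- state of B's inner (reversed) loop: digits already emitted, remaining rank
theorem decode_fold_state (opts : List (List String)) (k : Nat) (pre : List String) :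
    opts.reverse.foldl
      (fun (st : List String × Int) o =>
        (st.1 ++ [(PySem.List.pyGet? o (PySem.Int.mod st.2 (o.length : Int))).getD ""],
         PySem.Int.floordiv st.2 (o.length : Int)))
      (pre, (k : Int))
    = (pre ++ (pvDecodeNat opts k).reverse, ((k / pvTotalNat opts : Nat) : Int)) := by
  induction opts generalizing pre with
  | nil => simp [pvDecodeNat, pvTotalNat]
  | cons o rest ih =>
    rw [List.reverse_cons, List.foldl_append, ih]
    simp only [List.foldl_cons, List.foldl_nil, PySem.Int.mod_natCast,
      PySem.Int.floordiv_natCast, PySem.List.pyGet?_natCast, Prod.mk.injEq]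
    refine ⟨?_, ?_⟩
    · simp [pvDecodeNat, List.getD_eq_getElem?_getD]
    · rw [Nat.div_div_eq_div_mul]
      simp [pvTotalNat, Nat.mul_comm]

theorem pvDecode_natCast (opts : List (List String)) (k : Nat) :
    pvDecode opts (k : Int) = pvDecodeNat opts k := by
  unfold pvDecode
  rw [decode_fold_state opts k []]
  simp

-- decoding only depends on the rank modulo the total
theorem decodeNat_mod (opts : List (List String)) (q r : Nat) :
    pvDecodeNat opts (q * pvTotalNat opts + r) = pvDecodeNat opts r := by
  induction opts generalizing q with
  | nil => simp [pvDecodeNat]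
  | cons o rest ih =>
    have htot : pvTotalNat (o :: rest) = o.length * pvTotalNat rest := by
      simp [pvTotalNat]
    rw [htot]
    by_cases ht : pvTotalNat rest = 0
    · rw [ht]
      simp
    · simp only [pvDecodeNat]
      congr 1
      · have hidx : (q * (o.length * pvTotalNat rest) + r) / pvTotalNat rest % o.length
            = r / pvTotalNat rest % o.length := by
          rw [show q * (o.length * pvTotalNat rest) + r
                = r + (q * o.length) * pvTotalNat rest by ring]
          rw [Nat.add_mul_div_right _ _ (Nat.pos_of_ne_zero ht), Nat.add_mul_mod_self_right]
        rw [hidx]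
      · rw [show q * (o.length * pvTotalNat rest) + r
              = (q * o.length) * pvTotalNat rest + r by ring]
        exact ih (q * o.length)

-- range (a*b) enumerated as pairs (odometer order)
theorem range_mul_flatMap (a b : Nat) :
    List.range (a * b) = (List.range a).flatMap (fun q => (List.range b).map (fun r => q * b + r)) := by
  induction a with
  | zero => simp
  | succ a ih =>
    rw [Nat.succ_mul, List.range_add, ih, List.range_succ, List.flatMap_append]
    simp

-- a flatMap over a list is a flatMap over its indices
theorem flatMap_eq_flatMap_range {β : Type} (o : List String) (f : String → List β) :
    o.flatMap f = (List.range o.length).flatMap (fun q => f (o.getD q "")) := by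
  induction o with
  | nil => simp
  | cons x o' ih =>
    rw [List.flatMap_cons, List.length_cons, List.range_succ_eq_map, List.flatMap_cons,
      List.flatMap_map]
    simp only [List.getD_cons_zero, List.getD_cons_succ]
    rw [ih]

-- the heart: mapping the decoder over all ranks yields the cartesian product in odometer order
theorem map_decode_range (opts : List (List String)) :
    (List.range (pvTotalNat opts)).map (pvDecodeNat opts) = pvProdList opts := by
  induction opts with
  | nil => simp [pvTotalNat, pvProdList, List.range_succ, pvDecodeNat]
  | cons o rest ih =>
    have htot : pvTotalNat (o :: rest) = o.length * pvTotalNat rest := by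
      simp [pvTotalNat]
    have hR : pvProdList (o :: rest)
        = (List.range o.length).flatMap (fun q => (pvProdList rest).map (fun t => o.getD q "" :: t)) := by
      simp only [pvProdList, List.foldr_cons]
      exact flatMap_eq_flatMap_range o _
    rw [htot, range_mul_flatMap, List.map_flatMap, hR]
    have hstep : ∀ q ∈ List.range o.length,
        ((List.range (pvTotalNat rest)).map (fun r => q * pvTotalNat rest + r)).map
            (pvDecodeNat (o :: rest))
        = (pvProdList rest).map (fun t => o.getD q "" :: t) := by
      intro q hq
      have hq' : q < o.length := List.mem_range.mp hq
      rw [List.map_map, ← ih, List.map_map]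
      apply List.map_congr_left
      intro r hr
      have hr' : r < pvTotalNat rest := List.mem_range.mp hr
      have hpos : 0 < pvTotalNat rest := Nat.lt_of_le_of_lt (Nat.zero_le r) hr'
      have hdig : (q * pvTotalNat rest + r) / pvTotalNat rest % o.length = q := by
        rw [Nat.mul_comm q, Nat.mul_add_div hpos, Nat.div_eq_of_lt hr', Nat.add_zero,
          Nat.mod_eq_of_lt hq']
      show pvDecodeNat (o :: rest) (q * pvTotalNat rest + r) = o.getD q "" :: pvDecodeNat rest r
      simp only [pvDecodeNat, hdig, decodeNat_mod]
    rw [List.flatMap_def, List.flatMap_def, List.map_congr_left hstep]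

-- B's append-in-a-loop shapes as maps
theorem optsB_foldl (l : List (String × String)) :
    l.foldl (fun acc kv => acc ++ [pvOptions kv.2]) [] = l.map (fun kv => pvOptions kv.2) := by
  simpa using PySem.List.foldl_append_singleton_eq_map (fun kv => pvOptions kv.2) l []

theorem resB_foldl (opts : List (List String)) (rtr : String) (xs : List Int) :
    xs.foldl (fun res rank => res ++ [(pvDecode opts rank, rtr)]) []
    = xs.map (fun rank => (pvDecode opts rank, rtr)) := by
  simpa using PySem.List.foldl_append_singleton_eq_map (fun rank => (pvDecode opts rank, rtr)) xs []

-- ===== VERDICT (by name: the statement is the Claim_ definition above) =====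
theorem resolve_types_spec : Claim_equal_resolve_types := by
  intro arg_types return_type_repr _
  unfold Spec_resolve_types resolve_types resolve_types_alt
  simp only [outA_eq_map, List.nil_append, optsB_foldl, prod_fold_eq_prodList,
    total_fold_eq, one_mul, resB_foldl]
  rw [PySem.List.pyRange_zero_natCast, List.map_map, ← map_decode_range]
  simp [Function.comp_def, pvDecode_natCast, List.map_map]
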